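-- pv_equiv track=rewrite | github.com/oleonardomendes/backend_eduinclusiva_v1 | routes/especialista.py | _tendencia_habilidade
-- ===== SOURCE A (Python) =====
-- _NIVEL_VALOR = {"emergente": 1, "em_desenvolvimento": 2, "consolidado": 3}
--
-- def _tendencia_habilidade(valores: list) -> str:
--     numeros = [_NIVEL_VALOR[v] for v in valores if v in _NIVEL_VALOR]
--     if len(numeros) < 2:
--         return "estavel"
--     if numeros[-1] > numeros[0]:
--         return "melhorando"
--     if numeros[-1] < numeros[0]:
--         return "precisa_atencao"
--     return "estavel"
-- ===== SOURCE B (Python) =====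
-- _NIVEL_VALOR = {"emergente": 1, "em_desenvolvimento": 2, "consolidado": 3}
--
-- def _tendencia_habilidade(valores: list) -> str:
--     # forward scan: first valid value and remaining suffix
--     first = None
--     rest = []
--     for i, v in enumerate(valores):
--         k = _NIVEL_VALOR.get(v)
--         if k is not None:
--             first = k
--             rest = valores[i + 1:]
--             break
--     if first is None:
--         return "estavel"
--     # backward scan over the suffix: last valid value, if any (else only one valid total)
--     last = None
--     for v in reversed(rest):
--         k = _NIVEL_VALOR.get(v)
--         if k is not None:
--             last = k
--             break
--     if last is None:
--         return "estavel"
--     if last > first: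
--         return "melhorando"
--     if last < first:
--         return "precisa_atencao"
--     return "estavel"
-- ===== Notes on version B (the rewrite author's own statement) =====
-- stated objective: alternative
-- what changed: Instead of materialising the full filtered list of mapped levels, B scans forward to the first valid value and backward over the remaining suffix to the last valid value, returning 'estavel' when fewer than two valid values exist; no intermediate list is built.
import Mathlib
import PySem

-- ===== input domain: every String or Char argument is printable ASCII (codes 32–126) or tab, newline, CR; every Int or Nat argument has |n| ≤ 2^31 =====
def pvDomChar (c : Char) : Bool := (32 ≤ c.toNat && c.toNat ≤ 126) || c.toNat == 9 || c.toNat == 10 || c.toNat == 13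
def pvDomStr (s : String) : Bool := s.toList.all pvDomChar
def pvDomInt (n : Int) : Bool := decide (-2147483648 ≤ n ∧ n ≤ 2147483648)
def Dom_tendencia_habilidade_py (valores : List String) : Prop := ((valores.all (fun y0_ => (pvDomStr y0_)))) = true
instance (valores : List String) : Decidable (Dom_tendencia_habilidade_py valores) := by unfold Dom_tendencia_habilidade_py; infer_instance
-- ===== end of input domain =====

-- B differs by decomposition: instead of building the filtered list of mapped levels, it scans
-- forward to the first valid value and backward over the remaining suffix to the last valid value.

-- _NIVEL_VALOR.get(v) / membership-plus-lookup, shared by both sources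
def pvNivel? (v : String) : Option Int :=
  if v = "emergente" then some 1
  else if v = "em_desenvolvimento" then some 2
  else if v = "consolidado" then some 3
  else none

-- ===== PORT A =====
def tendencia_habilidade_py (valores : List String) : String :=
  let numeros := valores.filterMap pvNivel?
  if numeros.length < 2 then "estavel"
  else if PySem.List.pyGetD numeros (-1) 0 > PySem.List.pyGetD numeros 0 0 then "melhorando"
  else if PySem.List.pyGetD numeros (-1) 0 < PySem.List.pyGetD numeros 0 0 then "precisa_atencao"
  else "estavel"

-- ===== PORT B =====
-- forward scan: first valid value and the remaining suffix (valores[i+1:])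
def pvFirstScan : List String → Option (Int × List String)
  | [] => none
  | v :: rest =>
    match pvNivel? v with
    | some k => some (k, rest)
    | none => pvFirstScan rest

-- first valid value of a list (applied to the reversed suffix = backward scan)
def pvFirstHit : List String → Option Int
  | [] => none
  | v :: rest =>
    match pvNivel? v with
    | some k => some k
    | none => pvFirstHit rest

def tendencia_habilidade_py_alt (valores : List String) : String :=
  match pvFirstScan valores with
  | none => "estavel"
  | some (first, rest) =>
    match pvFirstHit rest.reverse with
    | none => "estavel"
    | some last =>
      if last > first then "melhorando"
      else if last < first then "precisa_atencao"
      else "estavel"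

-- ===== PRECONDITION & SPEC =====
def Spec_tendencia_habilidade_py (valores : List String) (out : String) : Prop := out = tendencia_habilidade_py_alt valores
instance (valores : List String) (out : String) : Decidable (Spec_tendencia_habilidade_py valores out) := by unfold Spec_tendencia_habilidade_py; infer_instance

-- ===== CLAIM (what is proved, stated in full; the proofs are below) =====
def Claim_equal_tendencia_habilidade_py : Prop := ∀ (valores : List String), Dom_tendencia_habilidade_py valores → Spec_tendencia_habilidade_py valores (tendencia_habilidade_py valores)

-- ===== LEMMAS AND PROOFS =====

lemma pvFirstScan_none (xs : List String) (h : pvFirstScan xs = none) :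
    xs.filterMap pvNivel? = [] := by
  induction xs with
  | nil => simp
  | cons v rest ih =>
    simp only [pvFirstScan] at h
    cases hv : pvNivel? v with
    | some k => simp [hv] at h
    | none =>
      rw [List.filterMap_cons_none hv]
      exact ih (by simpa [hv] using h)

lemma pvFirstScan_some (xs : List String) (k : Int) (rest : List String)
    (h : pvFirstScan xs = some (k, rest)) :
    xs.filterMap pvNivel? = k :: rest.filterMap pvNivel? := by
  induction xs with
  | nil => simp [pvFirstScan] at h
  | cons v tl ih =>
    simp only [pvFirstScan] at h
    cases hv : pvNivel? v with
    | some k' =>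
      simp [hv] at h
      simp [hv, h.1, h.2]
    | none => simp [hv] at h ⊢; exact ih h

lemma pvFirstHit_eq_head? (xs : List String) :
    pvFirstHit xs = (xs.filterMap pvNivel?).head? := by
  induction xs with
  | nil => simp [pvFirstHit]
  | cons v rest ih =>
    cases hv : pvNivel? v with
    | some k => simp [pvFirstHit, hv]
    | none => simp [pvFirstHit, hv, ih]

-- ===== VERDICT (by name: the statement is the Claim_ definition above) =====
theorem tendencia_habilidade_py_spec : Claim_equal_tendencia_habilidade_py := by
  intro valores _
  unfold Spec_tendencia_habilidade_py tendencia_habilidade_py tendencia_habilidade_py_alt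
  cases hfs : pvFirstScan valores with
  | none =>
    simp [pvFirstScan_none valores hfs]
  | some p =>
    obtain ⟨k, rest⟩ := p
    have hnum := pvFirstScan_some valores k rest hfs
    dsimp only
    rw [pvFirstHit_eq_head?, List.filterMap_reverse]
    cases htl : rest.filterMap pvNivel? with
    | nil => simp [hnum, htl]
    | cons t ts =>
      rw [hnum, htl]
      have hne : t :: ts ≠ ([] : List Int) := by simp
      have h1 : PySem.List.pyGetD (k :: t :: ts) (-1) 0 = (t :: ts).getLast hne := by
        rw [PySem.List.pyGetD_neg_one (k :: t :: ts) 0 (List.cons_ne_nil _ _)]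
        exact List.getLast_cons hne
      rw [List.head?_reverse, List.getLast?_eq_some_getLast hne]
      simp only [h1, PySem.List.pyGetD_zero_cons, List.length_cons]
      have hlen : ¬ ts.length + 1 + 1 < 2 := by omega
      rw [if_neg hlen]
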